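-- pv_equiv track=rewrite | github.com/Rupali59/ProgramSnippets | testing.py | optimal_journey
-- ===== SOURCE A (Python) =====
-- def optimal_journey(path, k, points):
--     if(len(path) <= 0):
--         return points
--     else:
--         values = []
--         max_count = min(len(path),k)
--         for i in range(max_count):
--             values.append(optimal_journey(path[i+1:],k,points+path[i]))
--         return max(values)
-- ===== SOURCE B (Python) =====
-- def optimal_journey(path, k, points):
--     n = len(path)
--     bests = [0]
--     for j in range(n - 1, -1, -1):
--         m = min(n - j, k)
--         bests.insert(0, max(path[j + i] + bests[i] for i in range(m)))
--     return points + bests[0]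
-- ===== Notes on version B (the rewrite author's own statement) =====
-- stated objective: faster
-- what changed: Replaces A's exponential branching recursion (re-solving every suffix at every call) with a bottom-up dynamic program that computes one best value per suffix of the path in a single backwards pass.
import Mathlib
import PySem

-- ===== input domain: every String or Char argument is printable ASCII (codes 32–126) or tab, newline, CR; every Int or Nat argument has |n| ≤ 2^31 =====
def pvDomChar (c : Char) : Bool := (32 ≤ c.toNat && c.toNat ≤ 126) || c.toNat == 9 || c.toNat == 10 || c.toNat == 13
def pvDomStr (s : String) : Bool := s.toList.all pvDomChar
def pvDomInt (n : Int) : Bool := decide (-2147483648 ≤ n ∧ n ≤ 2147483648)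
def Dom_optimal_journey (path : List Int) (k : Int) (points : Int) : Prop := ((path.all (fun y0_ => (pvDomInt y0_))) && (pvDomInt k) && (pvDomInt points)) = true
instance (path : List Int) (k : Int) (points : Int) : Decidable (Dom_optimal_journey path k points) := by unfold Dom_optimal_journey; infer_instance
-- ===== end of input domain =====

-- B replaces A's exponential branching recursion by a bottom-up DP over suffix start
-- indices (one best value per suffix), same return value on all admitted inputs.

-- ===== PORT A =====
-- Literal port of A: recursion over the slice path[i+1:], collecting the candidate
-- values in a list and taking max(values); max([]) (Python ValueError, only when k ≤ 0
-- and path ≠ []) is the .getD 0 default, excluded by Pre_.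
def optimal_journey (path : List Int) (k : Int) (points : Int) : Int :=
  if path.length ≤ 0 then points
  else
    let max_count : Int := min (path.length : Int) k
    let values := (PySem.List.pyRange 0 max_count 1).attach.map
      (fun i => optimal_journey (PySem.List.slice path (some (i.1 + 1)) none) k
                  (points + (PySem.List.pyGet? path i.1).getD 0))
    (PySem.List.max? values (fun v => v)).getD 0
termination_by path.length
decreasing_by
  have hi : 0 ≤ i.1 ∧ i.1 < max_count := (PySem.List.mem_pyRange_one).mp i.2
  rw [PySem.List.slice_from path (by omega : (0:Int) ≤ i.1 + 1)]
  simp only [List.length_drop]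
  omega

-- ===== PORT B =====
-- bests for all suffixes of path, built back to front (bests[j] = best extra sum
-- starting at suffix j); mirrors Source B's descending loop with insert(0, …).
def ojBests (path : List Int) (k : Int) : List Int :=
  match path with
  | [] => [0]
  | x :: rest =>
    let tail := ojBests rest k
    let m : Int := min ((rest.length : Int) + 1) k
    let cand := (PySem.List.pyRange 0 m 1).map
      (fun i => (PySem.List.pyGet? (x :: rest) i).getD 0 + PySem.List.pyGetD tail i 0)
    ((PySem.List.max? cand (fun v => v)).getD 0) :: tail

def optimal_journey_alt (path : List Int) (k : Int) (points : Int) : Int :=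
  points + PySem.List.pyGetD (ojBests path k) 0 0

-- ===== PRECONDITION & SPEC =====
-- Pre_ excludes exactly the inputs where both Pythons raise ValueError (max of an
-- empty sequence): a nonempty path with k ≤ 0.
def Pre_optimal_journey (path : List Int) (k : Int) (points : Int) : Prop :=
  path = [] ∨ 1 ≤ k
instance (path : List Int) (k : Int) (points : Int) : Decidable (Pre_optimal_journey path k points) := by unfold Pre_optimal_journey; infer_instance
def pvWitness_optimal_journey : List Int × Int × Int := ([3, -1, 4, 2], 2, 5)
def Spec_optimal_journey (path : List Int) (k : Int) (points : Int) (out : Int) : Prop := out = optimal_journey_alt path k points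
instance (path : List Int) (k : Int) (points : Int) (out : Int) : Decidable (Spec_optimal_journey path k points out) := by unfold Spec_optimal_journey; infer_instance

-- ===== CLAIM (what is proved, stated in full; the proofs are below) =====
def Claim_equal_optimal_journey : Prop := ∀ (path : List Int) (k : Int) (points : Int), Dom_optimal_journey path k points → Pre_optimal_journey path k points → Spec_optimal_journey path k points (optimal_journey path k points)

-- ===== LEMMAS AND PROOFS =====

-- dropping j suffix-bests is the suffix-bests of the dropped path
lemma ojBests_drop (k : Int) : ∀ (xs : List Int) (j : Nat),
    (ojBests xs k).drop j = if j ≤ xs.length then ojBests (xs.drop j) k else [] := by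
  intro xs
  induction xs with
  | nil =>
    intro j
    cases j with
    | zero => simp [ojBests]
    | succ n => simp [ojBests]
  | cons x rest ih =>
    intro j
    cases j with
    | zero => simp
    | succ n =>
      have : (ojBests (x :: rest) k).drop (n + 1) = (ojBests rest k).drop n := by
        simp [ojBests]
      rw [this, ih n]
      simp

lemma pyGetD_ojBests (k : Int) (xs : List Int) (i : Nat) (h : i ≤ xs.length) :
    PySem.List.pyGetD (ojBests xs k) (i : Int) 0
      = PySem.List.pyGetD (ojBests (xs.drop i) k) 0 0 := by
  rw [show ((0:Int)) = ((0:Nat):Int) from rfl, PySem.List.pyGetD_natCast,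
      PySem.List.pyGetD_natCast]
  rw [List.getD_eq_getElem?_getD, List.getD_eq_getElem?_getD]
  rw [show (ojBests xs k)[i]? = ((ojBests xs k).drop i)[0]? by simp [List.getElem?_drop]]
  rw [ojBests_drop k xs i, if_pos h]

-- max of a shifted nonempty list
lemma foldl_max_map_add (c : Int) : ∀ (s : List Int) (x : Int),
    List.foldl max (c + x) (s.map (fun v => c + v)) = c + List.foldl max x s := by
  intro s
  induction s with
  | nil => simp
  | cons y t ih =>
    intro x
    simp only [List.map_cons, List.foldl_cons, max_add_add_left]
    exact ih _

lemma max_getD_map_add (c : Int) (l : List Int) (hl : l ≠ []) :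
    (PySem.List.max? (l.map (fun v => c + v)) (fun v => v)).getD 0
      = c + (PySem.List.max? l (fun v => v)).getD 0 := by
  cases l with
  | nil => exact absurd rfl hl
  | cons x t =>
    rw [List.map_cons, PySem.List.max?_id_cons, PySem.List.max?_id_cons]
    simp only [Option.getD_some]
    exact foldl_max_map_add c t x

lemma oj_main (k : Int) (hk : 1 ≤ k) : ∀ (n : Nat) (path : List Int) (points : Int),
    path.length ≤ n → optimal_journey path k points = optimal_journey_alt path k points := by
  intro n
  induction n with
  | zero =>
    intro path points hlen
    have : path = [] := List.eq_nil_of_length_eq_zero (Nat.le_zero.mp hlen)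
    subst this
    simp [optimal_journey, optimal_journey_alt, ojBests, PySem.List.pyGetD]
  | succ n ih =>
    intro path points hlen
    cases hpath : path with
    | nil => simp [optimal_journey, optimal_journey_alt, ojBests, PySem.List.pyGetD]
    | cons x rest =>
      subst hpath
      have hlen' : rest.length ≤ n := by simpa using hlen
      rw [optimal_journey]
      have hnot : ¬ (x :: rest).length ≤ 0 := by simp
      rw [if_neg hnot]
      simp only []
      set m : Int := min (((x :: rest).length : Nat) : Int) k with hm
      have hm1 : 1 ≤ m := by
        rw [hm]; simp only [List.length_cons]
        have : (1:Int) ≤ ((rest.length + 1 : Nat) : Int) := by push_cast; omega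
        omega
      -- rewrite each candidate via the inductive hypothesis
      have hcand : ∀ i ∈ PySem.List.pyRange 0 m 1,
          optimal_journey (PySem.List.slice (x :: rest) (some (i + 1)) none) k
              (points + (PySem.List.pyGet? (x :: rest) i).getD 0)
            = points + ((PySem.List.pyGet? (x :: rest) i).getD 0
                + PySem.List.pyGetD (ojBests rest k) i 0) := by
        intro i hi
        have hib : 0 ≤ i ∧ i < m := (PySem.List.mem_pyRange_one).mp hi
        have hilen : i < ((x :: rest).length : Int) := lt_of_lt_of_le hib.2 (by rw [hm]; exact min_le_left _ _)
        have hslice : PySem.List.slice (x :: rest) (some (i + 1)) none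
            = (x :: rest).drop (i + 1).toNat := PySem.List.slice_from _ (by omega)
        rw [hslice]
        rw [ih ((x :: rest).drop (i + 1).toNat) _ (by simp only [List.length_drop]; omega)]
        unfold optimal_journey_alt
        have hdrop : (x :: rest).drop (i + 1).toNat = rest.drop i.toNat := by
          have : (i + 1).toNat = i.toNat + 1 := by omega
          rw [this]; rfl
        rw [hdrop]
        have hitoNat : i.toNat ≤ rest.length := by
          simp only [List.length_cons] at hilen
          omega
        have := pyGetD_ojBests k rest i.toNat hitoNat
        rw [Int.toNat_of_nonneg hib.1] at this
        rw [← this]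
        ring
      have hpmap : (PySem.List.pyRange 0 m 1).attach.map
          (fun i =>
            optimal_journey (PySem.List.slice (x :: rest) (some (i.1 + 1)) none) k
              (points + (PySem.List.pyGet? (x :: rest) i.1).getD 0))
          = (PySem.List.pyRange 0 m 1).map
              (fun i => points + ((PySem.List.pyGet? (x :: rest) i).getD 0
                + PySem.List.pyGetD (ojBests rest k) i 0)) := by
        have h1 := List.map_congr_left
          (l := (PySem.List.pyRange 0 m 1).attach)
          (f := fun i =>
            optimal_journey (PySem.List.slice (x :: rest) (some (i.1 + 1)) none) k
              (points + (PySem.List.pyGet? (x :: rest) i.1).getD 0))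
          (g := fun i => points + ((PySem.List.pyGet? (x :: rest) i.1).getD 0
                + PySem.List.pyGetD (ojBests rest k) i.1 0))
          (fun i _ => hcand i.1 i.2)
        rw [h1]
        simp
      rw [hpmap]
      -- now compare with B
      unfold optimal_journey_alt
      rw [show ojBests (x :: rest) k =
          ((PySem.List.max? ((PySem.List.pyRange 0 (min ((rest.length : Int) + 1) k) 1).map
              (fun i => (PySem.List.pyGet? (x :: rest) i).getD 0
                + PySem.List.pyGetD (ojBests rest k) i 0)) (fun v => v)).getD 0)
            :: ojBests rest k from rfl]
      have hmm : m = min ((rest.length : Int) + 1) k := by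
        rw [hm]; simp only [List.length_cons]; push_cast; ring_nf
      rw [← hmm]
      have hne : (PySem.List.pyRange 0 m 1).map
          (fun i => (PySem.List.pyGet? (x :: rest) i).getD 0
            + PySem.List.pyGetD (ojBests rest k) i 0) ≠ [] := by
        simp only [ne_eq, List.map_eq_nil_iff]
        intro hnil
        have := PySem.List.length_pyRange_one 0 m
        rw [hnil] at this
        simp at this
        omega
      have := max_getD_map_add points
        ((PySem.List.pyRange 0 m 1).map
          (fun i => (PySem.List.pyGet? (x :: rest) i).getD 0
            + PySem.List.pyGetD (ojBests rest k) i 0)) hne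
      rw [List.map_map] at this
      simp only [Function.comp_def] at this
      rw [this]
      rw [show ((0:Int)) = ((0:Nat):Int) from rfl, PySem.List.pyGetD_natCast]
      simpa using this

-- ===== VERDICT (by name: the statement is the Claim_ definition above) =====
theorem optimal_journey_spec : Claim_equal_optimal_journey := by
  intro path k points _ hpre
  unfold Spec_optimal_journey
  rcases hpre with hnil | hk
  · subst hnil
    simp [optimal_journey, optimal_journey_alt, ojBests, PySem.List.pyGetD]
  · exact oj_main k hk path.length path points le_rfl
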